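-- pv_equiv track=rewrite | github.com/boburshokhh/edu_atg2 | backend_django/apps/accounts/views.py | _determine_role_from_ldap
-- ===== SOURCE A (Python) =====
-- def _determine_role_from_ldap(ldap_user_info: dict) -> str:
--     """Determine user role from LDAP groups"""
--     groups = ldap_user_info.get('groups', [])
--
--     # Check for admin group
--     admin_groups = ['admin', 'administrators', 'admins', 'domain admins']
--     for group in groups:
--         if group.lower() in [ag.lower() for ag in admin_groups]:
--             return 'admin'
--
--     # Check for instructor group
--     instructor_groups = ['instructor', 'instructors', 'teachers', 'trainers']
--     for group in groups:
--         if group.lower() in [ig.lower() for ig in instructor_groups]: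
--             return 'instructor'
--
--     # Default to user
--     return 'user'
-- ===== SOURCE B (Python) =====
-- def _determine_role_from_ldap(ldap_user_info: dict) -> str:
--     """Determine user role from LDAP groups (single pass with priority flags)"""
--     groups = ldap_user_info.get('groups', [])
--     admin_set = {'admin', 'administrators', 'admins', 'domain admins'}
--     instructor_set = {'instructor', 'instructors', 'teachers', 'trainers'}
--     found_admin = False
--     found_instructor = False
--     for group in groups:
--         gl = group.lower()
--         if gl in admin_set:
--             found_admin = True
--             break
--         if gl in instructor_set:
--             found_instructor = True
--     if found_admin:
--         return 'admin'
--     if found_instructor: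
--         return 'instructor'
--     return 'user'
-- ===== Notes on version B (the rewrite author's own statement) =====
-- stated objective: alternative
-- what changed: Replaces A's two sequential full scans (each rebuilding a lowercased list comprehension per element) with one single pass that records admin/instructor flags against two precomputed lowercase sets, breaking early on admin, and decides by priority after the loop.
import Mathlib
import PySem

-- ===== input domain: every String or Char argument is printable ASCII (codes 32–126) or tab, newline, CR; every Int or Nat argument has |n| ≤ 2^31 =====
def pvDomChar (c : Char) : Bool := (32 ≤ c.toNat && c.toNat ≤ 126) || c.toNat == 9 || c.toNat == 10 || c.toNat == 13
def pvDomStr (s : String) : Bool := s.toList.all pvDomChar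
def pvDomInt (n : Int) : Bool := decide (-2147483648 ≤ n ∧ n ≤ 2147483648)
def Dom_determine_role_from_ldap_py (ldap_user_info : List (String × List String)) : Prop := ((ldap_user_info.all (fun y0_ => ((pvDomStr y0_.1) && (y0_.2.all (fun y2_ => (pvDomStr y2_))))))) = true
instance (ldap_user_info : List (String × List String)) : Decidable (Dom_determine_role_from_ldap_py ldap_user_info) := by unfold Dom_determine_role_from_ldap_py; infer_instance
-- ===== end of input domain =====

-- B: one pass over `groups` with priority flags and two precomputed lowercase sets,
-- instead of A's two sequential full scans; same return value, similar cost.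

-- ===== PORT A =====
-- A's first loop: return 'admin' on a match against the per-iteration lowered admin list
def aAdminLoop : List String → Option String
  | [] => none
  | g :: rest =>
    if ((["admin", "administrators", "admins", "domain admins"].map
          (fun ag => PySem.Str.lower ag)).contains (PySem.Str.lower g)) then some "admin"
    else aAdminLoop rest

-- A's second loop: return 'instructor' on a match against the lowered instructor list
def aInstrLoop : List String → Option String
  | [] => none
  | g :: rest =>
    if ((["instructor", "instructors", "teachers", "trainers"].map
          (fun ig => PySem.Str.lower ig)).contains (PySem.Str.lower g)) then some "instructor"
    else aInstrLoop rest

def determine_role_from_ldap_py (ldap_user_info : List (String × List String)) : String :=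
  let groups := PySem.Dict.getD (PySem.Dict.mk ldap_user_info) "groups" []
  match aAdminLoop groups with
  | some r => r
  | none =>
    match aInstrLoop groups with
    | some r => r
    | none => "user"

-- ===== PORT B =====
def bAdminSet : PySem.Set String := PySem.Set.ofList ["admin", "administrators", "admins", "domain admins"]
def bInstrSet : PySem.Set String := PySem.Set.ofList ["instructor", "instructors", "teachers", "trainers"]

-- B's single loop: returns (found_admin, found_instructor); breaks when admin is found
def bScan : List String → Bool → Bool × Bool
  | [], fi => (false, fi)
  | g :: rest, fi =>
    let gl := PySem.Str.lower g
    if PySem.Set.contains bAdminSet gl then (true, fi)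
    else bScan rest (fi || PySem.Set.contains bInstrSet gl)

def determine_role_from_ldap_py_alt (ldap_user_info : List (String × List String)) : String :=
  let groups := PySem.Dict.getD (PySem.Dict.mk ldap_user_info) "groups" []
  let flags := bScan groups false
  if flags.1 then "admin"
  else if flags.2 then "instructor"
  else "user"

-- ===== PRECONDITION & SPEC =====
def Spec_determine_role_from_ldap_py (ldap_user_info : List (String × List String)) (out : String) : Prop := out = determine_role_from_ldap_py_alt ldap_user_info
instance (ldap_user_info : List (String × List String)) (out : String) : Decidable (Spec_determine_role_from_ldap_py ldap_user_info out) := by unfold Spec_determine_role_from_ldap_py; infer_instance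

-- ===== CLAIM (what is proved, stated in full; the proofs are below) =====
def Claim_equal_determine_role_from_ldap_py : Prop := ∀ (ldap_user_info : List (String × List String)), Dom_determine_role_from_ldap_py ldap_user_info → Spec_determine_role_from_ldap_py ldap_user_info (determine_role_from_ldap_py ldap_user_info)

-- ===== LEMMAS AND PROOFS =====

-- A's admin condition and B's admin-set test agree (lowering the four literals is the identity)
lemma adminCond_eq (x : String) :
    ((["admin", "administrators", "admins", "domain admins"].map
        (fun ag => PySem.Str.lower ag)).contains x) = PySem.Set.contains bAdminSet x := rfl

lemma instrCond_eq (x : String) :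
    ((["instructor", "instructors", "teachers", "trainers"].map
        (fun ig => PySem.Str.lower ig)).contains x) = PySem.Set.contains bInstrSet x := rfl

-- A's instructor loop can only ever return 'instructor'
lemma aInstrLoop_some (gs : List String) : ∀ r, aInstrLoop gs = some r → r = "instructor" := by
  induction gs with
  | nil => intro r h; simp [aInstrLoop] at h
  | cons g rest ih =>
    intro r h
    simp only [aInstrLoop] at h
    split at h
    · exact (Option.some_inj.mp h).symm
    · exact ih r h

-- the single pass with flags decides exactly like the two sequential scans
lemma bScan_decides (gs : List String) : ∀ fi : Bool,
    (if (bScan gs fi).1 then "admin" else if (bScan gs fi).2 then "instructor" else "user")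
      = (match aAdminLoop gs with
         | some r => r
         | none =>
           match aInstrLoop gs with
           | some r => r
           | none => if fi then "instructor" else "user") := by
  induction gs with
  | nil => intro fi; simp [bScan, aAdminLoop, aInstrLoop]
  | cons g rest ih =>
    intro fi
    simp only [bScan, aAdminLoop, aInstrLoop, adminCond_eq, instrCond_eq]
    by_cases ha : PySem.Str.lower g ∈ bAdminSet
    · simp [ha]
    · by_cases hi : PySem.Str.lower g ∈ bInstrSet
      · simp [ha, hi]
        rw [ih true]
        cases h1 : aAdminLoop rest with
        | some r => simp
        | none =>
          simp only []
          cases h2 : aInstrLoop rest with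
          | some r => simp [aInstrLoop_some rest r h2]
          | none => simp
      · simp [ha, hi]
        exact ih fi

-- ===== VERDICT (by name: the statement is the Claim_ definition above) =====
theorem determine_role_from_ldap_py_spec : Claim_equal_determine_role_from_ldap_py := by
  intro info _
  unfold Spec_determine_role_from_ldap_py determine_role_from_ldap_py determine_role_from_ldap_py_alt
  exact (bScan_decides (PySem.Dict.getD (PySem.Dict.mk info) "groups" []) false).symm
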